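-- pv_equiv track=rewrite | github.com/jacobmathewin/weighbridge | modbus_probe.py | decode_s32_pairs
-- ===== SOURCE A (Python) =====
-- from typing import List, Tuple
--
-- def decode_s32_pairs(registers: List[int], big_endian: bool = True) -> List[int]:
-- 	values: List[int] = []
-- 	for i in range(0, len(registers) - 1, 2):
-- 		hi, lo = (registers[i], registers[i + 1]) if big_endian else (registers[i + 1], registers[i])
-- 		u = ((hi & 0xFFFF) << 16) | (lo & 0xFFFF)
-- 		if u & 0x80000000:
-- 			u = u - 0x100000000
-- 		values.append(u)
-- 	return values
-- ===== SOURCE B (Python) =====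
-- from typing import List
--
-- def decode_s32_pairs(registers: List[int], big_endian: bool = True) -> List[int]:
-- 	his, los = (registers[0::2], registers[1::2]) if big_endian else (registers[1::2], registers[0::2])
-- 	return [((h % 0x10000) * 0x10000 + l % 0x10000 + 0x80000000) % 0x100000000 - 0x80000000
-- 	        for h, l in zip(his, los)]
-- ===== Notes on version B (the rewrite author's own statement) =====
-- stated objective: alternative
-- what changed: Replaces the index loop with bit-masking/shift/or and a sign-bit branch by zipping the even/odd stride-2 slices and computing each signed value branch-free with pure modular arithmetic ((h%2^16)*2^16 + l%2^16 + 2^31) % 2^32 - 2^31.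
import Mathlib
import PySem

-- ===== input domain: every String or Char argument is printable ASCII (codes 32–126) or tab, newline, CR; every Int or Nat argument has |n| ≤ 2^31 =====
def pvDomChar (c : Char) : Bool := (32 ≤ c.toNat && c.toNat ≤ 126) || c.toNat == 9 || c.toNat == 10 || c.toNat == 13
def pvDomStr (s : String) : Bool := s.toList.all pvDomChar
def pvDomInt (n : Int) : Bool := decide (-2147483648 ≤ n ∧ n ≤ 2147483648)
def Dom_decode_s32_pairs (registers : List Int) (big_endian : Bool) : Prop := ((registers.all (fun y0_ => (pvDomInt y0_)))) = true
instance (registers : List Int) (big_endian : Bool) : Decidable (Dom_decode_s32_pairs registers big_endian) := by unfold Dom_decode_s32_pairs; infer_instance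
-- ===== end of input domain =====

-- B replaces A's index loop + bitwise/branching decode by zipping the stride-2 slices and a branch-free modular-arithmetic decode (alternative; same cost).
-- ===== PORT A =====
def decode_s32_pairs (registers : List Int) (big_endian : Bool) : List Int :=
  (PySem.List.pyRange 0 ((registers.length : Int) - 1) 2).foldl
    (fun values i =>
      -- registers[i], registers[i+1]: i ranges over 0,2,… < len-1, so both indices are always in range and the default of pyGetD is never used — exact
      let hl := if big_endian then (PySem.List.pyGetD registers i 0, PySem.List.pyGetD registers (i + 1) 0)
                else (PySem.List.pyGetD registers (i + 1) 0, PySem.List.pyGetD registers i 0)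
      let u := PySem.Int.bor ((PySem.Int.band hl.1 0xFFFF) <<< (16 : Nat)) (PySem.Int.band hl.2 0xFFFF)
      let u' := if PySem.Int.band u 0x80000000 ≠ 0 then u - 0x100000000 else u
      values ++ [u']) []

-- ===== PORT B =====
def decode_s32_pairs_alt (registers : List Int) (big_endian : Bool) : List Int :=
  -- registers[0::2] and registers[1::2]: the step 2 ≠ 0, so slice? is always some and the .getD [] default is never used — exact
  let evens := (PySem.List.slice? registers none none 2).getD []
  let odds := (PySem.List.slice? registers (some 1) none 2).getD []
  let hls := if big_endian then (evens, odds) else (odds, evens)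
  (hls.1.zip hls.2).map (fun hl =>
    PySem.Int.mod ((PySem.Int.mod hl.1 0x10000) * 0x10000 + PySem.Int.mod hl.2 0x10000 + 0x80000000) 0x100000000 - 0x80000000)

-- ===== PRECONDITION & SPEC =====
def Spec_decode_s32_pairs (registers : List Int) (big_endian : Bool) (out : List Int) : Prop := out = decode_s32_pairs_alt registers big_endian
instance (registers : List Int) (big_endian : Bool) (out : List Int) : Decidable (Spec_decode_s32_pairs registers big_endian out) := by unfold Spec_decode_s32_pairs; infer_instance

-- ===== CLAIM (what is proved, stated in full; the proofs are below) =====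
def Claim_equal_decode_s32_pairs : Prop := ∀ (registers : List Int) (big_endian : Bool), Dom_decode_s32_pairs registers big_endian → Spec_decode_s32_pairs registers big_endian (decode_s32_pairs registers big_endian)

-- ===== LEMMAS AND PROOFS =====

-- the per-pair value computed by A's loop body
def pvAu (h l : Int) : Int :=
  let u := PySem.Int.bor ((PySem.Int.band h 0xFFFF) <<< (16 : Nat)) (PySem.Int.band l 0xFFFF)
  if PySem.Int.band u 0x80000000 ≠ 0 then u - 0x100000000 else u

-- the per-pair value computed by B's comprehension
def pvBu (h l : Int) : Int :=
  PySem.Int.mod ((PySem.Int.mod h 0x10000) * 0x10000 + PySem.Int.mod l 0x10000 + 0x80000000) 0x100000000 - 0x80000000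

theorem pv_band_mask (h : Int) : PySem.Int.band h 65535 = h % 65536 := by
  unfold PySem.Int.band
  have e1 : ((65535 : Int).toNat) = 2 ^ 16 - 1 := rfl
  split_ifs with h1 h2 h2 <;> try norm_num at h2
  · rw [e1, Nat.and_two_pow_sub_one_eq_mod]; omega
  · rw [e1, Nat.and_comm, Nat.and_two_pow_sub_one_eq_mod]; omega

theorem pv_pair_eq (h l : Int) : pvAu h l = pvBu h l := by
  unfold pvAu pvBu
  rw [pv_band_mask, pv_band_mask, Int.shiftLeft_eq,
      PySem.Int.mod_eq_emod_of_pos (b := 65536) (by norm_num),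
      PySem.Int.mod_eq_emod_of_pos (b := 65536) (by norm_num),
      PySem.Int.mod_eq_emod_of_pos (b := 4294967296) (by norm_num)]
  set x := h % 65536 with hx
  set y := l % 65536 with hy
  have hx0 : 0 ≤ x := Int.emod_nonneg h (by norm_num)
  have hx1 : x < 65536 := Int.emod_lt_of_pos h (by norm_num)
  have hy0 : 0 ≤ y := Int.emod_nonneg l (by norm_num)
  have hy1 : y < 65536 := Int.emod_lt_of_pos l (by norm_num)
  have h216 : (2 : Int) ^ 16 = 65536 := by norm_num
  rw [h216]
  rw [PySem.Int.bor_of_nonneg (by positivity) hy0]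
  have ex : (x * 65536).toNat = x.toNat * 65536 := by omega
  have hor : x.toNat * 65536 ||| y.toNat = x.toNat * 65536 + y.toNat := by
    have := Nat.shiftLeft_add_eq_or_of_lt (i := 16) (b := y.toNat) (by omega) x.toNat
    rw [Nat.shiftLeft_eq] at this
    norm_num at this ⊢
    omega
  rw [ex, hor]
  set un := x.toNat * 65536 + y.toNat with hun
  have hub : un < 2 ^ 32 := by omega
  have hband : PySem.Int.band (↑un) 2147483648 = ((un &&& 2 ^ 31 : Nat) : Int) := by
    have h1 := PySem.Int.band_natCast un (2 ^ 31)
    norm_num at h1 ⊢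
    exact h1
  show (if PySem.Int.band ((un : Int)) 2147483648 ≠ 0 then (un : Int) - 4294967296 else (un : Int)) =
    (x * 65536 + y + 2147483648) % 4294967296 - 2147483648
  rw [hband, Nat.and_two_pow]
  have ht : un.testBit 31 = decide (un / 2 ^ 31 % 2 = 1) := Nat.testBit_eq_decide_div_mod_eq
  have hcond : ((((un.testBit 31).toNat * 2 ^ 31 : Nat)) : Int) ≠ 0 ↔ un.testBit 31 = true := by
    cases h : un.testBit 31 <;> simp
  split_ifs with hif
  · have hb := of_decide_eq_true (ht ▸ hcond.mp hif)
    omega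
  · have hb : ¬ (un / 2 ^ 31 % 2 = 1) := fun hh => hif (hcond.mpr (ht ▸ decide_eq_true hh))
    omega

theorem pvA_eq_map (registers : List Int) (big_endian : Bool) :
    decode_s32_pairs registers big_endian =
      (List.range (registers.length / 2)).map (fun k =>
        if big_endian then pvAu (registers.getD (2 * k) 0) (registers.getD (2 * k + 1) 0)
        else pvAu (registers.getD (2 * k + 1) 0) (registers.getD (2 * k) 0)) := by
  unfold decode_s32_pairs
  rw [PySem.List.pyRange_of_pos 0 ((registers.length : Int) - 1) (by norm_num)]
  have hc : (if (0 : Int) < (registers.length : Int) - 1 then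
      (((registers.length : Int) - 1 - 0 + 2 - 1) / 2).toNat else 0) = registers.length / 2 := by
    split <;> omega
  rw [hc]
  rw [List.foldl_map, PySem.List.foldl_append_singleton_eq_map, List.nil_append]
  refine List.map_congr_left (fun k hk => ?_)
  have h2k : (0 : Int) + 2 * (k : Int) = ((2 * k : Nat) : Int) := by push_cast; ring
  have h2k1 : (0 : Int) + 2 * (k : Int) + 1 = ((2 * k + 1 : Nat) : Int) := by push_cast; ring
  have h3 : ((2 * k : Nat) : Int) + 1 = ((2 * k + 1 : Nat) : Int) := by push_cast; ring
  cases big_endian <;>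
    simp only [h2k, h3, PySem.List.pyGetD_natCast, if_true, if_false, Bool.false_eq_true] <;>
    rfl

theorem pv_filterMap_getElem (xs : List Int) (c : Nat) (f : Nat → Nat) (h : ∀ k, k < c → f k < xs.length) :
    List.filterMap (fun k => xs[f k]?) (List.range c) = (List.range c).map (fun k => xs.getD (f k) 0) := by
  have hcg : ∀ k ∈ List.range c, xs[f k]? = some (xs.getD (f k) 0) := by
    intro k hk
    have hlt := h k (List.mem_range.mp hk)
    rw [List.getElem?_eq_getElem hlt, List.getD_eq_getElem _ _ hlt]
  rw [List.filterMap_congr hcg,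
      show (fun k => some (xs.getD (f k) 0)) = some ∘ (fun k => xs.getD (f k) 0) from rfl,
      List.filterMap_eq_map]

theorem pv_slice_evens (xs : List Int) :
    ((PySem.List.slice? xs none none 2).getD []) =
      (List.range ((xs.length + 1) / 2)).map (fun k => xs.getD (2 * k) 0) := by
  unfold PySem.List.slice? PySem.List.sliceIndices
  norm_num
  have hc : (if 0 < xs.length then (((xs.length : Int) + 2 - 1) / 2).toNat else 0)
      = (xs.length + 1) / 2 := by split <;> omega
  rw [hc]
  have hf : (fun k : Nat => xs[(2 * (k : Int)).toNat]?) = fun k : Nat => xs[2 * k]? := by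
    funext k
    have h2 : (2 * (k : Int)).toNat = 2 * k := by omega
    rw [h2]
  have hb : ∀ k, k < (xs.length + 1) / 2 → 2 * k < xs.length := by omega
  rw [hf, pv_filterMap_getElem xs _ (fun k => 2 * k) hb]
  rfl

theorem pv_slice_odds (xs : List Int) :
    ((PySem.List.slice? xs (some 1) none 2).getD []) =
      (List.range (xs.length / 2)).map (fun k => xs.getD (2 * k + 1) 0) := by
  cases xs with
  | nil => rfl
  | cons a t =>
    unfold PySem.List.slice? PySem.List.sliceIndices
    norm_num
    have hc : (if 0 < t.length then (((t.length : Int) + 2 - 1) / 2).toNat else 0)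
        = (t.length + 1) / 2 := by split <;> omega
    rw [hc]
    have hf : (fun x : Nat => (a :: t)[(1 + 2 * (x : Int)).toNat]?) = fun x : Nat => t[2 * x]? := by
      funext k
      have h2 : (1 + 2 * (k : Int)).toNat = 2 * k + 1 := by omega
      rw [h2, List.getElem?_cons_succ]
    have hb : ∀ k, k < (t.length + 1) / 2 → 2 * k < t.length := by omega
    rw [hf, pv_filterMap_getElem t _ (fun k => 2 * k) hb]
    rfl

theorem pv_zip_map_range (f g : Nat → Int) (a b : Nat) (h : b ≤ a) :
    (((List.range a).map f).zip ((List.range b).map g)) = (List.range b).map (fun k => (f k, g k)) := by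
  apply List.ext_getElem
  · simp [Nat.min_eq_right h]
  · intro i h1 h2
    simp at h1 h2 ⊢

theorem pv_zip_map_range' (f g : Nat → Int) (a b : Nat) (h : b ≤ a) :
    (((List.range b).map g).zip ((List.range a).map f)) = (List.range b).map (fun k => (g k, f k)) := by
  apply List.ext_getElem
  · simp [Nat.min_eq_left h]
  · intro i h1 h2
    simp at h1 h2 ⊢

theorem pv_zip_halves (xs : List Int) :
    (((PySem.List.slice? xs none none 2).getD []).zip ((PySem.List.slice? xs (some 1) none 2).getD [])) =
      (List.range (xs.length / 2)).map (fun k => (xs.getD (2 * k) 0, xs.getD (2 * k + 1) 0)) := by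
  rw [pv_slice_evens, pv_slice_odds, pv_zip_map_range _ _ _ _ (by omega)]

theorem pv_zip_halves' (xs : List Int) :
    (((PySem.List.slice? xs (some 1) none 2).getD []).zip ((PySem.List.slice? xs none none 2).getD [])) =
      (List.range (xs.length / 2)).map (fun k => (xs.getD (2 * k + 1) 0, xs.getD (2 * k) 0)) := by
  rw [pv_slice_evens, pv_slice_odds, pv_zip_map_range' _ _ _ _ (by omega)]

theorem pvB_eq_map (registers : List Int) (big_endian : Bool) :
    decode_s32_pairs_alt registers big_endian =
      (List.range (registers.length / 2)).map (fun k =>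
        if big_endian then pvBu (registers.getD (2 * k) 0) (registers.getD (2 * k + 1) 0)
        else pvBu (registers.getD (2 * k + 1) 0) (registers.getD (2 * k) 0)) := by
  unfold decode_s32_pairs_alt
  cases big_endian
  · simp only [if_false, Bool.false_eq_true]
    rw [pv_zip_halves' registers, List.map_map]
    rfl
  · simp only [if_true]
    rw [pv_zip_halves registers, List.map_map]
    rfl

-- ===== VERDICT (by name: the statement is the Claim_ definition above) =====
theorem decode_s32_pairs_spec : Claim_equal_decode_s32_pairs := by
  intro registers big_endian _
  unfold Spec_decode_s32_pairs
  rw [pvA_eq_map, pvB_eq_map]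
  exact List.map_congr_left (fun k _ => by split <;> exact pv_pair_eq _ _)
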